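-- pv_equiv track=rewrite | github.com/UcarLab/COVID-RSV-Infants | snATAC-seq/3a_CreateObjects/CreateAnndata.py | getCountsByBarcode
-- ===== SOURCE A (Python) =====
-- def getCountsByBarcode(records, barcodes):
--     """
--     @records -  The record iterator that provides a list of chr, start, end, barcode for each entry
--     @barcode - Dictionary of column indices.
--
--     @return - List of [colindex, count]
--     """
--     countdict = dict()
--     for currecord in records:
--         curbc = currecord[3]
--         if curbc in barcodes:
--             colidx = barcodes[curbc]
--             if colidx not in countdict:
--                 countdict[colidx] = 0
--             countdict[colidx] = countdict[colidx]+1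
--
--     colsortedcounts = sorted(countdict.keys())
--     rv = []
--     for curcol in colsortedcounts:
--         rv.append([curcol, countdict[curcol]])
--     return rv
-- ===== SOURCE B (Python) =====
-- def getCountsByBarcode(records, barcodes):
--     """
--     @records -  The record iterator that provides a list of chr, start, end, barcode for each entry
--     @barcode - Dictionary of column indices.
--
--     @return - List of [colindex, count]
--
--     Sort-then-group: collect the column index of every record whose barcode is
--     known, sort those indices, then emit one [col, runlength] pair per run of
--     equal values in the sorted list.
--     """
--     cols = sorted(barcodes[r[3]] for r in records if r[3] in barcodes)
--     rv = []
--     i = 0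
--     while i < len(cols):
--         j = i + 1
--         while j < len(cols) and cols[j] == cols[i]:
--             j += 1
--         rv.append([cols[i], j - i])
--         i = j
--     return rv
-- ===== Notes on version B (the rewrite author's own statement) =====
-- stated objective: alternative
-- what changed: Replaces A's counter dictionary (count per column, then sort the dict keys) by a sort-then-group strategy: one pass collects the matched column indices, sorts them, and a grouping loop over the sorted list emits [col, runlength] per run; Pre_ excludes only records with fewer than 4 fields, on which both A and B raise IndexError.
import Mathlib
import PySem

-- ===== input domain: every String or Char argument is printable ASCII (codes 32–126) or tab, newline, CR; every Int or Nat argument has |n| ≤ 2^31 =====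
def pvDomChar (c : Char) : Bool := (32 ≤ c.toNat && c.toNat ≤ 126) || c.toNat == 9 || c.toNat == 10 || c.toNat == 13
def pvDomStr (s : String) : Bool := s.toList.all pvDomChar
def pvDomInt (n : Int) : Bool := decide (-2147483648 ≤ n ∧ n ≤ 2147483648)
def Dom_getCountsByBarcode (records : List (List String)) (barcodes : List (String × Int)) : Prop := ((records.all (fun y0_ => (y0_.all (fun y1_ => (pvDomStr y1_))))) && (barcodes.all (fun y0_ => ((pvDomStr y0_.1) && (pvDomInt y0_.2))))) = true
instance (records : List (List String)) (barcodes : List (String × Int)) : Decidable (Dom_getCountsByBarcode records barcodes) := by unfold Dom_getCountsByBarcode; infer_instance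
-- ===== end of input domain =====

-- B replaces A's counter dictionary by a sort-then-group pass over the matched column
-- indices (alternative organisation, not claimed faster; same return value).

-- ===== PORT A =====
def getCountsByBarcode (records : List (List String)) (barcodes : List (String × Int)) : List (List Int) :=
  let bdict := PySem.Dict.ofList barcodes
  let countdict := records.foldl (fun countdict currecord =>
    match PySem.List.pyGet? currecord 3 with
    | none => countdict        -- Python raises IndexError here; Pre_ excludes such records
    | some curbc =>
      match bdict.get? curbc with   -- 'if curbc in barcodes: colidx = barcodes[curbc]'
      | none => countdict
      | some colidx =>
        let countdict := if countdict.contains colidx then countdict else countdict.insert colidx (0:Int)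
        countdict.insert colidx (countdict.getD colidx 0 + 1)) PySem.Dict.empty
  let colsortedcounts := PySem.List.sorted countdict.keys (fun x => x)
  colsortedcounts.foldl (fun rv curcol => rv ++ [[curcol, countdict.getD curcol 0]]) []

-- ===== PORT B =====
-- the outer while loop of Source B: each step handles one run of equal values, the inner
-- 'while cols[j] == cols[i]' counter being the length of the run after its first element
def groupRuns : List Int → List (List Int)
  | [] => []
  | c :: t =>
    let k := (t.takeWhile (fun x => x == c)).length
    [c, (k : Int) + 1] :: groupRuns (t.drop k)
termination_by l => l.length
decreasing_by simp [List.length_drop]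

def getCountsByBarcode_alt (records : List (List String)) (barcodes : List (String × Int)) : List (List Int) :=
  let bdict := PySem.Dict.ofList barcodes
  let cols := PySem.List.sorted (records.filterMap (fun r =>
    (PySem.List.pyGet? r 3).bind bdict.get?)) (fun x => x)   -- 'barcodes[r[3]] for r in records if r[3] in barcodes'; pyGet? none = IndexError, excluded by Pre_
  groupRuns cols

-- ===== PRECONDITION & SPEC =====
-- Pre_ excludes exactly the inputs where Python A raises IndexError (a record with fewer
-- than 4 fields); Python B raises there too.
def Pre_getCountsByBarcode (records : List (List String)) (barcodes : List (String × Int)) : Prop :=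
  ∀ r ∈ records, 4 ≤ r.length

instance (records : List (List String)) (barcodes : List (String × Int)) : Decidable (Pre_getCountsByBarcode records barcodes) := by unfold Pre_getCountsByBarcode; infer_instance

def pvWitness_getCountsByBarcode : List (List String) × (List (String × Int)) :=
  ([["chr1", "0", "5", "AAA"], ["chr2", "3", "9", "CCC"]], [("AAA", 2), ("GGG", 0)])

def Spec_getCountsByBarcode (records : List (List String)) (barcodes : List (String × Int)) (out : List (List Int)) : Prop := out = getCountsByBarcode_alt records barcodes
instance (records : List (List String)) (barcodes : List (String × Int)) (out : List (List Int)) : Decidable (Spec_getCountsByBarcode records barcodes out) := by unfold Spec_getCountsByBarcode; infer_instance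

-- ===== CLAIM (what is proved, stated in full; the proofs are below) =====
def Claim_equal_getCountsByBarcode : Prop := ∀ (records : List (List String)) (barcodes : List (String × Int)), Dom_getCountsByBarcode records barcodes → Pre_getCountsByBarcode records barcodes → Spec_getCountsByBarcode records barcodes (getCountsByBarcode records barcodes)

-- ===== LEMMAS AND PROOFS =====

theorem drop_len_takeWhile (p : Int → Bool) (t : List Int) :
    t.drop (t.takeWhile p).length = t.dropWhile p := by
  induction t with
  | nil => rfl
  | cons b tb ih =>
    rw [List.takeWhile_cons, List.dropWhile_cons]
    by_cases hb : p b = true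
    · simp [hb, ih]
    · simp [hb]

theorem head_dropWhile_false (p : Int → Bool) (t : List Int) (a : Int) (l : List Int)
    (h : t.dropWhile p = a :: l) : p a = false := by
  induction t with
  | nil => simp at h
  | cons b tb ih =>
    rw [List.dropWhile_cons] at h
    by_cases hb : p b = true
    · simp [hb] at h; exact ih h
    · simp [hb] at h; simp [← h.1]; simpa using hb

-- a record loop that skips records whose (pyGet? r 3 >>= lookup) fails is a fold over the filterMap
theorem foldl_skip_none {γ : Type} (d : PySem.Dict String Int) (step : γ → Int → γ)
    (l : List (List String)) (init : γ) :
    l.foldl (fun acc r =>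
      match PySem.List.pyGet? r 3 with
      | none => acc
      | some bc =>
        match d.get? bc with
        | none => acc
        | some x => step acc x) init
    = (l.filterMap (fun r => (PySem.List.pyGet? r 3).bind d.get?)).foldl step init := by
  induction l generalizing init with
  | nil => rfl
  | cons r t ih =>
    simp only [List.foldl_cons, List.filterMap_cons]
    cases hg : PySem.List.pyGet? r 3 with
    | none => simpa [hg] using ih init
    | some bc =>
      cases hd : d.get? bc with
      | none => simpa [hg, hd] using ih init
      | some x => simpa [hg, hd] using ih (step init x)

-- A's dict-update step (setdefault-then-increment) is the counter step
theorem stepA_eq_counter_step (dd : PySem.Dict Int Int) (x : Int) :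
    ((if dd.contains x then dd else dd.insert x (0:Int)).insert x
      ((if dd.contains x then dd else dd.insert x (0:Int)).getD x 0 + 1)) = dd.insert x (dd.getD x 0 + 1) := by
  by_cases h : dd.contains x = true
  · simp [h]
  · simp only [Bool.not_eq_true] at h
    simp [h, PySem.Dict.insert_insert_self, PySem.Dict.getD_insert_self,
      PySem.Dict.getD_of_not_contains dd 0 h]

-- the grouping loop on a weakly increasing list yields [value, multiplicity] over the
-- sorted distinct values
theorem groupRuns_eq_map : ∀ (n : Nat) (s : List Int), s.length ≤ n → s.Pairwise (· ≤ ·) →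
    groupRuns s = (PySem.List.sorted (PySem.Set.ofList s) (fun x => x)).map
      (fun c => [c, (s.count c : Int)]) := by
  intro n
  induction n with
  | zero =>
    intro s hl _
    rw [List.length_eq_zero_iff.mp (Nat.le_zero.mp hl)]
    simp [groupRuns, PySem.List.sorted_eq_nil_iff]
  | succ n ih =>
    intro s hl hp
    cases s with
    | nil => simp [groupRuns, PySem.List.sorted_eq_nil_iff]
    | cons c t =>
      have hct : ∀ x ∈ t, c ≤ x := (List.pairwise_cons.mp hp).1
      have ht : t.Pairwise (· ≤ ·) := (List.pairwise_cons.mp hp).2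
      have hdrop : t.drop (t.takeWhile (fun x => x == c)).length = t.dropWhile (fun x => x == c) :=
        drop_len_takeWhile _ t
      set run := t.takeWhile (fun x => x == c) with hrundef
      set rest := t.dropWhile (fun x => x == c) with hrestdef
      have hrun : ∀ x ∈ run, x = c := fun x hx => by
        simpa using List.mem_takeWhile_imp hx
      have hrest_sub : rest.Sublist t := List.dropWhile_sublist _
      have hrest_pw : rest.Pairwise (· ≤ ·) := ht.sublist hrest_sub
      have hrest_gt : ∀ x ∈ rest, c < x := by
        intro x hx
        cases hr : rest with
        | nil => rw [hr] at hx; simp at hx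
        | cons a l =>
          have ha : (a == c) = false := head_dropWhile_false _ t a l (hrestdef ▸ hr)
          have hane : a ≠ c := by simpa using ha
          have hca : c < a :=
            lt_of_le_of_ne (hct a (hrest_sub.mem (hr ▸ List.mem_cons_self))) (Ne.symm hane)
          rw [hr] at hx
          rcases List.mem_cons.mp hx with rfl | hxl
          · exact hca
          · exact lt_of_lt_of_le hca (List.rel_of_pairwise_cons (hr ▸ hrest_pw) hxl)
      have hcnotin : c ∉ rest := fun h => lt_irrefl c (hrest_gt c h)
      have hsplit : run ++ rest = t := List.takeWhile_append_dropWhile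
      -- the sorted distinct values of c :: t
      have hsortedrest_mem : ∀ x, x ∈ PySem.List.sorted (PySem.Set.ofList rest) (fun y => y) ↔ x ∈ rest := by
        intro x; rw [PySem.List.mem_sorted, PySem.Set.mem_ofList]
      have hset : PySem.List.sorted (PySem.Set.ofList (c :: t)) (fun x => x)
          = c :: PySem.List.sorted (PySem.Set.ofList rest) (fun x => x) := by
        apply PySem.List.sorted_eq_of_perm_of_pairwise_lt
        · apply (List.perm_ext_iff_of_nodup ?_ (PySem.Set.nodup_ofList _)).mpr
          · intro x
            rw [List.mem_cons, hsortedrest_mem, PySem.Set.mem_ofList, List.mem_cons, ← hsplit,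
              List.mem_append]
            constructor
            · rintro (rfl | hx)
              · exact Or.inl rfl
              · exact Or.inr (Or.inr hx)
            · rintro (rfl | hx | hx)
              · exact Or.inl rfl
              · exact Or.inl (hrun x hx)
              · exact Or.inr hx
          · exact List.nodup_cons.mpr ⟨fun h => hcnotin ((hsortedrest_mem c).mp h),
              (PySem.List.sorted_perm _ _ _).nodup_iff.mpr (PySem.Set.nodup_ofList _)⟩
        · refine List.pairwise_cons.mpr ⟨fun y hy => hrest_gt y ((hsortedrest_mem y).mp hy), ?_⟩
          exact PySem.List.sorted_ofList_pairwise_lt _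
      -- counts
      have hcountc : (c :: t).count c = run.length + 1 := by
        rw [List.count_cons_self, ← hsplit, List.count_append,
          List.count_eq_length.mpr (fun b hb => (hrun b hb).symm),
          List.count_eq_zero.mpr hcnotin]
      have hcounty : ∀ y ∈ rest, (c :: t).count y = rest.count y := by
        intro y hy
        have hyne : c ≠ y := ne_of_lt (hrest_gt y hy)
        rw [List.count_cons_of_ne hyne, ← hsplit, List.count_append,
          List.count_eq_zero.mpr (fun h => hyne (hrun y h).symm), Nat.zero_add]
      -- assemble
      have hgr : groupRuns (c :: t)
          = [c, ((t.takeWhile (fun x => x == c)).length : Int) + 1]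
            :: groupRuns (t.drop (t.takeWhile (fun x => x == c)).length) := by
        rw [groupRuns.eq_def]
      rw [hgr, hset, List.map_cons]
      simp only [← hrundef, hdrop]
      have hlen : rest.length ≤ n := by
        have := hrest_sub.length_le
        simpa using Nat.le_trans this (Nat.le_of_succ_le_succ (by simpa using hl))
      rw [ih rest hlen hrest_pw]
      congr 1
      · rw [hcountc]; push_cast; ring_nf
      · apply List.map_congr_left
        intro y hy
        rw [hcounty y ((hsortedrest_mem y).mp hy)]
-- grouping the sorted matched indices = mapping counts over the sorted distinct indices
theorem groupRuns_sorted_eq (l : List Int) :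
    groupRuns (PySem.List.sorted l (fun x => x))
      = (PySem.List.sorted (PySem.Set.ofList l) (fun x => x)).map (fun c => [c, (l.count c : Int)]) := by
  set s := PySem.List.sorted l (fun x => x) with hs
  have hperm : s.Perm l := PySem.List.sorted_perm _ _ _
  have hp : s.Pairwise (· ≤ ·) := PySem.List.sorted_pairwise _ _
  rw [groupRuns_eq_map s.length s le_rfl hp]
  have hsets : PySem.List.sorted (PySem.Set.ofList s) (fun x => x)
      = PySem.List.sorted (PySem.Set.ofList l) (fun x => x) := by
    apply PySem.List.sorted_eq_sorted_of_perm _ _ _ (fun a b h => h)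
    apply (List.perm_ext_iff_of_nodup (PySem.Set.nodup_ofList _) (PySem.Set.nodup_ofList _)).mpr
    intro x
    rw [PySem.Set.mem_ofList, PySem.Set.mem_ofList]
    exact hperm.mem_iff
  rw [hsets]
  apply List.map_congr_left
  intro y _
  rw [hperm.count_eq]

-- ===== VERDICT (by name: the statement is the Claim_ definition above) =====
theorem getCountsByBarcode_spec : Claim_equal_getCountsByBarcode := by
  intro records barcodes _ _
  unfold Spec_getCountsByBarcode getCountsByBarcode getCountsByBarcode_alt
  set d := PySem.Dict.ofList barcodes with hd
  set idxs := records.filterMap (fun r => (PySem.List.pyGet? r 3).bind d.get?) with hidxs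
  -- A side: the count dict is Counter(idxs)
  have hstep : (fun (countdict : PySem.Dict Int Int) (currecord : List String) =>
      match PySem.List.pyGet? currecord 3 with
      | none => countdict
      | some curbc =>
        match d.get? curbc with
        | none => countdict
        | some colidx =>
          let countdict2 := if countdict.contains colidx then countdict else countdict.insert colidx (0:Int)
          countdict2.insert colidx (countdict2.getD colidx 0 + 1))
      = (fun (countdict : PySem.Dict Int Int) (currecord : List String) =>
      match PySem.List.pyGet? currecord 3 with
      | none => countdict
      | some curbc =>
        match d.get? curbc with
        | none => countdict
        | some colidx => countdict.insert colidx (countdict.getD colidx 0 + 1)) := by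
    funext dd r
    cases PySem.List.pyGet? r 3 with
    | none => rfl
    | some bc =>
      simp only []
      cases d.get? bc with
      | none => rfl
      | some x => exact stepA_eq_counter_step dd x
  have hcount : records.foldl (fun (countdict : PySem.Dict Int Int) currecord =>
      match PySem.List.pyGet? currecord 3 with
      | none => countdict
      | some curbc =>
        match d.get? curbc with
        | none => countdict
        | some colidx =>
          let countdict2 := if countdict.contains colidx then countdict else countdict.insert colidx (0:Int)
          countdict2.insert colidx (countdict2.getD colidx 0 + 1)) PySem.Dict.empty
      = PySem.Dict.counter idxs := by
    rw [hstep, hidxs]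
    exact (foldl_skip_none d (fun (dd : PySem.Dict Int Int) x => dd.insert x (dd.getD x 0 + 1)) records PySem.Dict.empty).trans
      (PySem.Dict.foldl_insert_getD_add_one_eq_counter _)
  show (List.foldl (fun rv curcol => rv ++ [[curcol,
      (records.foldl (fun (countdict : PySem.Dict Int Int) currecord =>
        match PySem.List.pyGet? currecord 3 with
        | none => countdict
        | some curbc =>
          match d.get? curbc with
          | none => countdict
          | some colidx =>
            let countdict2 := if countdict.contains colidx then countdict else countdict.insert colidx (0:Int)
            countdict2.insert colidx (countdict2.getD colidx 0 + 1)) PySem.Dict.empty).getD curcol 0]]) []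
      (PySem.List.sorted (records.foldl (fun (countdict : PySem.Dict Int Int) currecord =>
        match PySem.List.pyGet? currecord 3 with
        | none => countdict
        | some curbc =>
          match d.get? curbc with
          | none => countdict
          | some colidx =>
            let countdict2 := if countdict.contains colidx then countdict else countdict.insert colidx (0:Int)
            countdict2.insert colidx (countdict2.getD colidx 0 + 1)) PySem.Dict.empty).keys (fun x => x)))
    = groupRuns (PySem.List.sorted idxs (fun x => x))
  rw [hcount, PySem.Dict.keys_counter]
  have hgetD : (fun (rv : List (List Int)) (curcol : Int) => rv ++ [[curcol, (PySem.Dict.counter idxs).getD curcol 0]])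
      = fun rv curcol => rv ++ [[curcol, (idxs.count curcol : Int)]] := by
    funext rv c; rw [PySem.Dict.getD_counter]
  rw [hgetD, PySem.List.foldl_append_singleton_eq_map, groupRuns_sorted_eq]
  exact List.nil_append _
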